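-- pv_equiv track=rewrite | github.com/pypi-data/pypi-mirror-404 | packages/rootly-mcp-server/rootly_mcp_server-2.1.0-py3-none-any.whl/rootly_mcp_server/smart_utils.py | _words_similar
-- ===== SOURCE A (Python) =====
-- def _words_similar(word1: str, word2: str) -> bool:
--     """Check if two words are similar enough to be considered related."""
--     # Handle common variations
--     variations = {
--         "elastic": ["elasticsearch", "elk"],
--         "payment": ["payments", "pay", "billing"],
--         "database": ["db", "postgres", "mysql", "mongo"],
--         "timeout": ["timeouts", "timed-out", "timing-out"],
--         "service": ["services", "svc", "api", "app"],
--         "error": ["errors", "err", "failure", "failed", "failing"],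
--         "down": ["outage", "offline", "unavailable"],
--     }
--
--     # Check if words are variations of each other
--     for base, variants in variations.items():
--         if (word1 == base and word2 in variants) or (word2 == base and word1 in variants):
--             return True
--         if word1 in variants and word2 in variants:
--             return True
--
--     # Check substring similarity (at least 70% overlap for longer words)
--     if len(word1) >= 5 and len(word2) >= 5:
--         shorter = min(word1, word2, key=len)
--         longer = max(word1, word2, key=len)
--         if shorter in longer and len(shorter) / len(longer) >= 0.7:
--             return True
--
--     # Check if one word starts with the other (for prefixed services)
--     if len(word1) >= 4 and len(word2) >= 4:
--         if word1.startswith(word2) or word2.startswith(word1):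
--             return True
--
--     return False
-- ===== SOURCE B (Python) =====
-- # B: inverted index (token -> group id) built once + three small predicate
-- # helpers combined with `or`, replacing A's per-call group loop and nested ifs.
-- _VARIATIONS = {
--     "elastic": ["elasticsearch", "elk"],
--     "payment": ["payments", "pay", "billing"],
--     "database": ["db", "postgres", "mysql", "mongo"],
--     "timeout": ["timeouts", "timed-out", "timing-out"],
--     "service": ["services", "svc", "api", "app"],
--     "error": ["errors", "err", "failure", "failed", "failing"],
--     "down": ["outage", "offline", "unavailable"],
-- }
--
-- _GROUP = {}
-- for _i, (_base, _variants) in enumerate(_VARIATIONS.items()):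
--     for _t in [_base] + _variants:
--         _GROUP[_t] = _i
--
--
-- def _same_group(w1: str, w2: str) -> bool:
--     return w1 in _GROUP and w2 in _GROUP and _GROUP[w1] == _GROUP[w2]
--
--
-- def _overlap(w1: str, w2: str) -> bool:
--     # 70% substring overlap for words of length >= 5 (first-minimal /
--     # first-maximal choice, like min/max with key=len)
--     if len(w1) < 5 or len(w2) < 5:
--         return False
--     shorter = w1 if len(w1) <= len(w2) else w2
--     longer = w1 if len(w1) >= len(w2) else w2
--     return shorter in longer and 10 * len(shorter) >= 7 * len(longer)
--
--
-- def _shared_prefix(w1: str, w2: str) -> bool: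
--     return len(w1) >= 4 and len(w2) >= 4 and (w1.startswith(w2) or w2.startswith(w1))
--
--
-- def _words_similar(word1: str, word2: str) -> bool:
--     """Check if two words are similar enough to be considered related."""
--     return _same_group(word1, word2) or _overlap(word1, word2) or _shared_prefix(word1, word2)
-- ===== Notes on version B (the rewrite author's own statement) =====
-- stated objective: idiomatic
-- what changed: The per-call loop over the seven variation groups is replaced by a module-level inverted index (token -> group id) built once, and A's early-return nested blocks are decomposed into three small predicate helpers (_same_group, _overlap, _shared_prefix) combined with a single `or`.
import Mathlib
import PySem

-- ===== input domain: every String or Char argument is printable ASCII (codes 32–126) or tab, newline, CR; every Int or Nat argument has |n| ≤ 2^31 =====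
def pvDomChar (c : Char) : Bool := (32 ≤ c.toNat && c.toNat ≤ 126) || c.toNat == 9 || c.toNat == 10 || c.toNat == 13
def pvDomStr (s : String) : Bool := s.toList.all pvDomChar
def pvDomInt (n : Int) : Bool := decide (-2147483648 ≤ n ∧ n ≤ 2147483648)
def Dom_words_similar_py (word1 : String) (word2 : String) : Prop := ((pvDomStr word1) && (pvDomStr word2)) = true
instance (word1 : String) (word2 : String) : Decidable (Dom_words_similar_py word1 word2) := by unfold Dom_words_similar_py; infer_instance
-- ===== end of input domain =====

-- B replaces A's per-call loop over the variation groups by an inverted index (token -> group id)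
-- built once, and replaces A's nested early-return blocks by three small predicates joined with `or`.
-- In BOTH ports the float test `len(shorter) / len(longer) >= 0.7` is ported as the exact rational
-- comparison of 10*len(shorter) with 7*len(longer), which agrees with CPython's float comparison for
-- all string lengths that fit in memory.

-- ===== PORT A =====
def pyVariations : List (String × List String) :=
  [("elastic", ["elasticsearch", "elk"]),
   ("payment", ["payments", "pay", "billing"]),
   ("database", ["db", "postgres", "mysql", "mongo"]),
   ("timeout", ["timeouts", "timed-out", "timing-out"]),
   ("service", ["services", "svc", "api", "app"]),
   ("error", ["errors", "err", "failure", "failed", "failing"]),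
   ("down", ["outage", "offline", "unavailable"])]

-- the `for base, variants in variations.items()` loop with its two early returns
def wsLoop (groups : List (String × List String)) (word1 : String) (word2 : String) : Bool :=
  match groups with
  | [] => false
  | (base, variants) :: rest =>
    if (word1 == base && variants.contains word2) || (word2 == base && variants.contains word1) then
      true
    else if variants.contains word1 && variants.contains word2 then
      true
    else wsLoop rest word1 word2

def words_similar_py (word1 : String) (word2 : String) : Bool :=
  if wsLoop pyVariations word1 word2 then true
  else if 5 ≤ PySem.Str.len word1 && 5 ≤ PySem.Str.len word2 then
    -- min/max with key=len return the FIRST extremal argument, so ties give word1 for both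
    let shorter := if PySem.Str.len word1 ≤ PySem.Str.len word2 then word1 else word2
    let longer := if PySem.Str.len word2 ≤ PySem.Str.len word1 then word1 else word2
    if PySem.Str.isIn shorter longer && 7 * PySem.Str.len longer ≤ 10 * PySem.Str.len shorter then
      true
    else if 4 ≤ PySem.Str.len word1 && 4 ≤ PySem.Str.len word2 then
      PySem.Str.startswith word1 word2 || PySem.Str.startswith word2 word1
    else false
  else if 4 ≤ PySem.Str.len word1 && 4 ≤ PySem.Str.len word2 then
    PySem.Str.startswith word1 word2 || PySem.Str.startswith word2 word1
  else false

-- ===== PORT B =====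
def pyVariationsAlt : PySem.Dict String (List String) :=
  PySem.Dict.ofList
  [("elastic", ["elasticsearch", "elk"]),
   ("payment", ["payments", "pay", "billing"]),
   ("database", ["db", "postgres", "mysql", "mongo"]),
   ("timeout", ["timeouts", "timed-out", "timing-out"]),
   ("service", ["services", "svc", "api", "app"]),
   ("error", ["errors", "err", "failure", "failed", "failing"]),
   ("down", ["outage", "offline", "unavailable"])]

-- module-level `for _i, (_base, _variants) in enumerate(_VARIATIONS.items()):
--                 for _t in [_base] + _variants: _GROUP[_t] = _i`
def pyGroup : PySem.Dict String Int :=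
  (PySem.List.enumerate pyVariationsAlt.items 0).foldl
    (fun d p => ([p.2.1] ++ p.2.2).foldl (fun d' t => d'.insert t p.1) d)
    PySem.Dict.empty

def pySameGroup (w1 : String) (w2 : String) : Bool :=
  pyGroup.contains w1 && pyGroup.contains w2 && (pyGroup.getD w1 (-1) == pyGroup.getD w2 (-1))

def pyOverlap (w1 : String) (w2 : String) : Bool :=
  if PySem.Str.len w1 < 5 || PySem.Str.len w2 < 5 then false
  else
    let shorter := if PySem.Str.len w1 ≤ PySem.Str.len w2 then w1 else w2
    let longer := if PySem.Str.len w1 ≥ PySem.Str.len w2 then w1 else w2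
    PySem.Str.isIn shorter longer && 10 * PySem.Str.len shorter ≥ 7 * PySem.Str.len longer

def pySharedPrefix (w1 : String) (w2 : String) : Bool :=
  4 ≤ PySem.Str.len w1 && 4 ≤ PySem.Str.len w2
    && (PySem.Str.startswith w1 w2 || PySem.Str.startswith w2 w1)

def words_similar_py_alt (word1 : String) (word2 : String) : Bool :=
  pySameGroup word1 word2 || pyOverlap word1 word2 || pySharedPrefix word1 word2

-- ===== PRECONDITION & SPEC =====
def Spec_words_similar_py (word1 : String) (word2 : String) (out : Bool) : Prop := out = words_similar_py_alt word1 word2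
instance (word1 : String) (word2 : String) (out : Bool) : Decidable (Spec_words_similar_py word1 word2 out) := by unfold Spec_words_similar_py; infer_instance

-- ===== CLAIM =====
def Claim_equal_words_similar_py : Prop := ∀ (word1 : String) (word2 : String), Dom_words_similar_py word1 word2 → Spec_words_similar_py word1 word2 (words_similar_py word1 word2)

-- ===== LEMMAS AND PROOFS =====

-- the tokens that occur anywhere in the variation table
def wsTokens : List String :=
  ["elastic", "elasticsearch", "elk", "payment", "payments", "pay", "billing",
   "database", "db", "postgres", "mysql", "mongo", "timeout", "timeouts", "timed-out",
   "timing-out", "service", "services", "svc", "api", "app", "error", "errors", "err",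
   "failure", "failed", "failing", "down", "outage", "offline", "unavailable"]

theorem keys_pyGroup : pyGroup.keys = wsTokens := by decide

theorem contains_pyGroup_of_not_token {w : String} (h : w ∉ wsTokens) :
    pyGroup.contains w = false := by
  rw [PySem.Dict.contains_eq_decide_mem_keys, keys_pyGroup]
  simpa using h

theorem wsLoop_mem_gen (groups : List (String × List String)) (w1 w2 : String)
    (h : wsLoop groups w1 w2 = true) :
    (∃ p ∈ groups, w1 = p.1 ∨ w1 ∈ p.2) ∧ (∃ p ∈ groups, w2 = p.1 ∨ w2 ∈ p.2) := by
  induction groups with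
  | nil => simp [wsLoop] at h
  | cons g rest ih =>
    obtain ⟨base, variants⟩ := g
    rw [wsLoop] at h
    split_ifs at h with h1 h2
    · simp only [Bool.or_eq_true, Bool.and_eq_true, beq_iff_eq, List.contains_eq_mem,
        decide_eq_true_eq] at h1
      rcases h1 with ⟨e1, m2⟩ | ⟨e2, m1⟩
      · exact ⟨⟨(base, variants), by simp, Or.inl e1⟩, ⟨(base, variants), by simp, Or.inr m2⟩⟩
      · exact ⟨⟨(base, variants), by simp, Or.inr m1⟩, ⟨(base, variants), by simp, Or.inl e2⟩⟩
    · simp only [Bool.and_eq_true, List.contains_eq_mem, decide_eq_true_eq] at h2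
      exact ⟨⟨(base, variants), by simp, Or.inr h2.1⟩, ⟨(base, variants), by simp, Or.inr h2.2⟩⟩
    · obtain ⟨⟨p, hp, hw⟩, ⟨q, hq, hv⟩⟩ := ih h
      exact ⟨⟨p, List.mem_cons_of_mem _ hp, hw⟩, ⟨q, List.mem_cons_of_mem _ hq, hv⟩⟩

theorem mem_tokens_of_hit {w : String} (h : ∃ p ∈ pyVariations, w = p.1 ∨ w ∈ p.2) :
    w ∈ wsTokens := by
  obtain ⟨p, hp, hw⟩ := h
  simp only [pyVariations, List.mem_cons, List.not_mem_nil, or_false] at hp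
  rcases hp with rfl | rfl | rfl | rfl | rfl | rfl | rfl <;>
    simp only [List.mem_cons, List.not_mem_nil, or_false] at hw <;>
    simp [wsTokens] <;> tauto

theorem wsLoop_mem {word1 word2 : String} (h : wsLoop pyVariations word1 word2 = true) :
    word1 ∈ wsTokens ∧ word2 ∈ wsTokens :=
  ⟨mem_tokens_of_hit (wsLoop_mem_gen _ _ _ h).1, mem_tokens_of_hit (wsLoop_mem_gen _ _ _ h).2⟩

-- A's two trailing blocks equal B's two trailing predicates, for ALL inputs
theorem tail_eq (w1 w2 : String) :
    (if 5 ≤ PySem.Str.len w1 && 5 ≤ PySem.Str.len w2 then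
      if PySem.Str.isIn (if PySem.Str.len w1 ≤ PySem.Str.len w2 then w1 else w2)
           (if PySem.Str.len w2 ≤ PySem.Str.len w1 then w1 else w2)
         && 7 * PySem.Str.len (if PySem.Str.len w2 ≤ PySem.Str.len w1 then w1 else w2)
            ≤ 10 * PySem.Str.len (if PySem.Str.len w1 ≤ PySem.Str.len w2 then w1 else w2) then
        true
      else if 4 ≤ PySem.Str.len w1 && 4 ≤ PySem.Str.len w2 then
        PySem.Str.startswith w1 w2 || PySem.Str.startswith w2 w1
      else false
    else if 4 ≤ PySem.Str.len w1 && 4 ≤ PySem.Str.len w2 then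
      PySem.Str.startswith w1 w2 || PySem.Str.startswith w2 w1
    else false)
    = (pyOverlap w1 w2 || pySharedPrefix w1 w2) := by
  unfold pyOverlap pySharedPrefix
  simp only [ge_iff_le]
  by_cases h1 : (5 : Int) ≤ PySem.Str.len w1 <;> by_cases h2 : (5 : Int) ≤ PySem.Str.len w2
  · -- both long: the inner 4-length guard holds on both sides
    have hn1 : ¬ (PySem.Str.len w1 < 5) := by omega
    have hn2 : ¬ (PySem.Str.len w2 < 5) := by omega
    have h41 : (4 : Int) ≤ PySem.Str.len w1 := by omega
    have h42 : (4 : Int) ≤ PySem.Str.len w2 := by omega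
    by_cases hab : PySem.Str.len w1 ≤ PySem.Str.len w2
    · by_cases hba : PySem.Str.len w2 ≤ PySem.Str.len w1
      · simp only [h1, h2, hn1, hn2, h41, h42, hab, hba, decide_true, decide_false,
          if_true, if_false, Bool.and_true, Bool.true_and, Bool.or_false]
        cases PySem.Str.isIn w1 w1 &&
            decide (7 * PySem.Str.len w1 ≤ 10 * PySem.Str.len w1) <;> simp
      · simp only [h1, h2, hn1, hn2, h41, h42, hab, hba, decide_true, decide_false,
          if_true, if_false, Bool.and_true, Bool.true_and, Bool.or_false]
        cases PySem.Str.isIn w1 w2 &&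
            decide (7 * PySem.Str.len w2 ≤ 10 * PySem.Str.len w1) <;> simp
    · have hba : PySem.Str.len w2 ≤ PySem.Str.len w1 := by omega
      simp only [h1, h2, hn1, hn2, h41, h42, hab, hba, decide_true, decide_false,
        if_true, if_false, Bool.and_true, Bool.true_and, Bool.or_false]
      cases PySem.Str.isIn w2 w1 &&
          decide (7 * PySem.Str.len w1 ≤ 10 * PySem.Str.len w2) <;> simp
  all_goals {
    -- at least one word is shorter than 5: A skips the overlap block and so does B
    have hno : (PySem.Str.len w1 < 5) ∨ (PySem.Str.len w2 < 5) := by omega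
    have h5f : (decide (5 ≤ PySem.Str.len w1) && decide (5 ≤ PySem.Str.len w2)) = false := by
      simp only [Bool.and_eq_false_iff, decide_eq_false_iff_not]; omega
    have hnb : (decide (PySem.Str.len w1 < 5) || decide (PySem.Str.len w2 < 5)) = true := by
      simp only [Bool.or_eq_true, decide_eq_true_eq]; omega
    rw [if_neg (by rw [h5f]; exact Bool.false_ne_true), if_pos hnb, Bool.false_or]
    by_cases h41 : (4 : Int) ≤ PySem.Str.len w1 <;> by_cases h42 : (4 : Int) ≤ PySem.Str.len w2 <;>
      simp [h41, h42]
  }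

set_option maxHeartbeats 2000000 in
theorem ws_eq_of_tokens : ∀ w1 ∈ wsTokens, ∀ w2 ∈ wsTokens,
    words_similar_py w1 w2 = words_similar_py_alt w1 w2 := by
  have hGrp : pyGroup = PySem.Dict.mk
    [("elastic", 0), ("elasticsearch", 0), ("elk", 0),
     ("payment", 1), ("payments", 1), ("pay", 1), ("billing", 1),
     ("database", 2), ("db", 2), ("postgres", 2), ("mysql", 2), ("mongo", 2),
     ("timeout", 3), ("timeouts", 3), ("timed-out", 3), ("timing-out", 3),
     ("service", 4), ("services", 4), ("svc", 4), ("api", 4), ("app", 4),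
     ("error", 5), ("errors", 5), ("err", 5), ("failure", 5), ("failed", 5), ("failing", 5),
     ("down", 6), ("outage", 6), ("offline", 6), ("unavailable", 6)] := by decide
  simp only [words_similar_py_alt, pySameGroup, hGrp]
  decide

-- ===== VERDICT (by name: the statement is the Claim_ definition above) =====
theorem words_similar_py_spec : Claim_equal_words_similar_py := by
  intro word1 word2 _
  unfold Spec_words_similar_py
  by_cases h1 : word1 ∈ wsTokens
  · by_cases h2 : word2 ∈ wsTokens
    · exact (ws_eq_of_tokens word1 h1 word2 h2)
    · have hl : wsLoop pyVariations word1 word2 = false := by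
        cases hb : wsLoop pyVariations word1 word2 with
        | false => rfl
        | true => exact absurd (wsLoop_mem hb).2 h2
      have hg : pySameGroup word1 word2 = false := by
        unfold pySameGroup
        rw [contains_pyGroup_of_not_token h2]
        simp
      unfold words_similar_py words_similar_py_alt
      rw [hl, hg, if_neg (by simp), Bool.false_or]
      exact tail_eq word1 word2
  · have hl : wsLoop pyVariations word1 word2 = false := by
      cases hb : wsLoop pyVariations word1 word2 with
      | false => rfl
      | true => exact absurd (wsLoop_mem hb).1 h1
    have hg : pySameGroup word1 word2 = false := by
      unfold pySameGroup
      rw [contains_pyGroup_of_not_token h1]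
      simp
    unfold words_similar_py words_similar_py_alt
    rw [hl, hg, if_neg (by simp), Bool.false_or]
    exact tail_eq word1 word2
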